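-- pv_equiv track=rewrite | github.com/juliefolkerts/pp1 | 13-TestsRetake/p7.py | f
-- ===== SOURCE A (Python) =====
-- def f(d):
--     in_park = set()
--
--     for car, action in d:
--         if action == "in":
--             in_park.add(car)
--         elif action == "out" and car in in_park:
--             in_park.remove(car)
--
--     result = sorted(list(in_park))
--     return result
-- ===== SOURCE B (Python) =====
-- def f(d):
--     def last_rel(car):
--         for c, a in reversed(d):
--             if c == car and (a == "in" or a == "out"):
--                 return a
--         return None
--     return [car for car in sorted({c for c, _ in d}) if last_rel(car) == "in"]
-- ===== Notes on version B (the rewrite author's own statement) =====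
-- stated objective: alternative
-- what changed: Instead of simulating the park with a live membership set updated per event, B first collects the sorted distinct cars and then, for each car independently, scans the event list backwards to find that car's most recent 'in'/'out' event, keeping the car iff that event is 'in'.
import Mathlib
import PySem

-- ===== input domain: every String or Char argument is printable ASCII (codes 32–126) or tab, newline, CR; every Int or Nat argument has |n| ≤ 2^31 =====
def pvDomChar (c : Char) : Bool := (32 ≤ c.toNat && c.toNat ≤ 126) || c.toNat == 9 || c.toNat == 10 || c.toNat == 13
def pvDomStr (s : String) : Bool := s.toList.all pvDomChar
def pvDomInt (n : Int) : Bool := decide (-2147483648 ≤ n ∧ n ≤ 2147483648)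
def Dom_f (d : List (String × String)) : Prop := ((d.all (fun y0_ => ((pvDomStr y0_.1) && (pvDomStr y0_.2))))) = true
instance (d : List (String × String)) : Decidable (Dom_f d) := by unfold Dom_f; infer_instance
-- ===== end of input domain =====

-- B drops A's event-by-event simulation of the park (a live membership set): it takes the
-- sorted distinct cars and, per car, scans the events backwards for that car's most recent
-- in/out event; objective: alternative decomposition (B is not faster).

-- ===== PORT A =====
-- one event step of A's loop: add on "in", conditional remove on "out"
def stepA (s : PySem.Set String) (p : String × String) : PySem.Set String :=
  if p.2 == "in" then PySem.Set.add s p.1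
  else if p.2 == "out" && PySem.Set.contains s p.1 then (PySem.Set.remove? s p.1).getD s
  else s

def f (d : List (String × String)) : List String :=
  PySem.List.sorted (d.foldl stepA PySem.Set.empty) (fun x => x)

-- ===== PORT B =====
-- B's inner loop: walk the (already reversed) events, return the first in/out action of `car`
def lastRel (car : String) : List (String × String) → Option String
  | [] => none
  | p :: t =>
      if p.1 == car && (p.2 == "in" || p.2 == "out") then some p.2 else lastRel car t

def f_alt (d : List (String × String)) : List String :=
  (PySem.List.sorted (PySem.Set.ofList (d.map Prod.fst)) (fun x => x)).filter
    (fun car => lastRel car d.reverse == some "in")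

-- ===== PRECONDITION & SPEC =====
def Spec_f (d : List (String × String)) (out : List String) : Prop := out = f_alt d
instance (d : List (String × String)) (out : List String) : Decidable (Spec_f d out) := by unfold Spec_f; infer_instance

-- ===== CLAIM (what is proved, stated in full; the proofs are below) =====
def Claim_equal_f : Prop := ∀ (d : List (String × String)), Dom_f d → Spec_f d (f d)

-- ===== LEMMAS AND PROOFS =====

-- appending one event at the end of the reversed list only matters if nothing matched before
lemma lastRel_append (car : String) (l : List (String × String)) (p : String × String) :
    lastRel car (l ++ [p]) =
      ((lastRel car l).or
        (if p.1 == car && (p.2 == "in" || p.2 == "out") then some p.2 else none)) := by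
  induction l with
  | nil => simp [lastRel]
  | cons q t ih =>
      simp only [List.cons_append, lastRel]
      by_cases h : (q.1 == car && (q.2 == "in" || q.2 == "out")) = true
      · simp [h]
      · simp [h, ih]

-- a car with a relevant event occurs among the keys
lemma lastRel_mem (car : String) (l : List (String × String)) (a : String)
    (h : lastRel car l = some a) : car ∈ l.map Prod.fst := by
  induction l with
  | nil => simp [lastRel] at h
  | cons q t ih =>
      simp only [lastRel] at h
      split_ifs at h with hq
      · have : q.1 = car := by simpa using (And.left (by simpa using hq))
        simp [this]
      · simp [ih h]

-- A's set after the whole loop holds car iff its most recent in/out event is "in"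
-- (or there is none and the car was in the start set)
lemma foldl_stepA_mem (d : List (String × String)) :
    ∀ (s : PySem.Set String) (c : String), s.Nodup →
      ((d.foldl stepA s).Nodup ∧
       (c ∈ d.foldl stepA s ↔
         lastRel c d.reverse = some "in" ∨ (lastRel c d.reverse = none ∧ c ∈ s))) := by
  induction d with
  | nil => intro s c hs; simp [lastRel, hs]
  | cons p t ih =>
      intro s c hs
      have hrev : (p :: t).reverse = t.reverse ++ [p] := by simp
      rw [List.foldl_cons, hrev, lastRel_append]
      have hsnd : (stepA s p).Nodup := by
        unfold stepA
        split_ifs with h1 h2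
        · exact PySem.Set.nodup_add s p.1 hs
        · rcases Bool.and_eq_true_iff.1 h2 with ⟨-, hmem⟩
          have hm : p.1 ∈ s := by simpa [PySem.Set.contains] using hmem
          simpa [PySem.Set.remove?_of_mem hm] using PySem.Set.nodup_discard s p.1 hs
        · exact hs
      obtain ⟨hnd, hmem⟩ := ih (stepA s p) c hsnd
      refine ⟨hnd, hmem.trans ?_⟩
      rcases h : lastRel c t.reverse with _ | a
      · -- no later relevant event of c: the pending event p decides
        simp only [Option.none_or]
        by_cases hc : p.1 = c
        · by_cases hin : p.2 = "in"
          · simp [stepA, hin, hc, PySem.Set.mem_add]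
          · by_cases hout : p.2 = "out"
            · -- the car is removed (or was absent): both sides false resp. c ∉ stepA s p
              have hst : c ∉ stepA s p := by
                unfold stepA
                split_ifs with h1 h2
                · simp [hin] at h1
                · rcases Bool.and_eq_true_iff.1 h2 with ⟨-, hmemb⟩
                  have hm : p.1 ∈ s := by simpa [PySem.Set.contains] using hmemb
                  rw [hc] at hm
                  simp [hc, PySem.Set.remove?_of_mem hm, PySem.Set.mem_discard]
                · intro hcs
                  exact (by simpa [PySem.Set.contains, hc, hout] using h2 : c ∉ s) hcs
              simp [hc, hout, hst]
            · have hst : stepA s p = s := by simp [stepA, hin, hout]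
              simp [hst, hc, hin, hout]
        · have hst : c ∈ stepA s p ↔ c ∈ s := by
            unfold stepA
            split_ifs with h1 h2
            · simp [PySem.Set.mem_add, Ne.symm hc]
            · rcases Bool.and_eq_true_iff.1 h2 with ⟨-, hmemb⟩
              have hm : p.1 ∈ s := by simpa [PySem.Set.contains] using hmemb
              simp [PySem.Set.remove?_of_mem hm, PySem.Set.mem_discard, Ne.symm hc]
            · rfl
          simp [hc, hst]
      · -- a later relevant event of c exists: p is irrelevant
        simp [Option.or]

-- ===== VERDICT (by name: the statement is the Claim_ definition above) =====
theorem f_spec : Claim_equal_f := by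
  intro d _
  unfold Spec_f f f_alt
  set L := (PySem.List.sorted (PySem.Set.ofList (d.map Prod.fst)) (fun x => x)).filter
      (fun car => lastRel car d.reverse == some "in") with hL
  have hplt : L.Pairwise (· < ·) :=
    (PySem.List.sorted_ofList_pairwise_lt (d.map Prod.fst)).sublist List.filter_sublist
  obtain ⟨hnd, -⟩ := foldl_stepA_mem d PySem.Set.empty "" List.nodup_nil
  have hLnd : L.Nodup := hplt.imp fun h => ne_of_lt h
  have hperm : L.Perm (d.foldl stepA PySem.Set.empty) := by
    refine (List.perm_ext_iff_of_nodup hLnd hnd).2 fun c => ?_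
    obtain ⟨-, hmem⟩ := foldl_stepA_mem d PySem.Set.empty c List.nodup_nil
    rw [hL, List.mem_filter, hmem]
    constructor
    · rintro ⟨-, h⟩
      exact Or.inl (by simpa using h)
    · rintro (h | ⟨-, h⟩)
      · refine ⟨?_, by simpa using h⟩
        have := lastRel_mem c d.reverse "in" h
        simp only [PySem.List.mem_sorted, PySem.Set.mem_ofList]
        simpa using this
      · simp [PySem.Set.empty] at h
  exact PySem.List.sorted_eq_of_perm_of_pairwise_lt _ _ (fun x => x) hperm hplt
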